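-- pv_equiv track=rewrite | github.com/yeseong31/coding-test | 프로그래머스/3/152995. 인사고과/인사고과.py | solution
-- ===== SOURCE A (Python) =====
-- def solution(scores):
--     answer = scores[0]
--     scores.sort(key=lambda x: (-x[0], x[1]))
--
--     max_p = 0
--     rank = 1
--
--     for w, p in scores:
--         if answer[0] < w and answer[1] < p:
--             return -1
--         if max_p <= p:
--             max_p = p
--             if sum(answer) < w + p:
--                 rank += 1
--
--     return rank
-- ===== SOURCE B (Python) =====
-- def solution(scores):
--     # Brute-force domination count; NOTE: unlike A, B does not sort `scores`
--     # in place (return-value equivalence only).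
--     answer = scores[0]
--     base = answer[0] + answer[1]
--
--     def dominated(x):
--         return any(w > x[0] and p > x[1] for w, p in scores)
--
--     if dominated(answer):
--         return -1
--     return 1 + sum(1 for x in scores if not dominated(x) and x[0] + x[1] > base)
-- ===== Notes on version B (the rewrite author's own statement) =====
-- stated objective: alternative
-- what changed: Replaces A's sort-then-streaming-prefix-max pass with direct O(n^2) domination scans over the unsorted list (no sort, no running maximum, no early-return scan order); B also does not reproduce A's in-place sort of the argument.
-- intended difference: On inputs whose first pair is undominated but which contain an undominated pair with negative second score and pairwise sum exceeding the first pair's, A's prefix maximum initialised to 0 skips such pairs and undercounts the rank (e.g. returns 1 on [[0,-1],[5,-2]]), while B counts every undominated pair with a larger sum (returns 2), which is the intended rank. — e.g. on solution([[0, -1], [5, -2]]): A returns 1, B returns 2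
import Mathlib
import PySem

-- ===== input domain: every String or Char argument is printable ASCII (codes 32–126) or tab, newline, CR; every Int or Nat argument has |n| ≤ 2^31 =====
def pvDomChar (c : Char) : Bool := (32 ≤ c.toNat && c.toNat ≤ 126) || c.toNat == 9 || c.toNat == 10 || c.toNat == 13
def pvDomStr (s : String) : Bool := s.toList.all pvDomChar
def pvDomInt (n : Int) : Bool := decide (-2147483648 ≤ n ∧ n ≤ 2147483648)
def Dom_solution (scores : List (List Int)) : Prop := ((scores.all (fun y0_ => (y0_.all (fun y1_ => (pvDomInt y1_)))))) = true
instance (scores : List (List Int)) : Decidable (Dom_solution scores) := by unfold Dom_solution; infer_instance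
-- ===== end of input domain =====

-- B's Python does NOT reproduce A's in-place sort of `scores`; the equivalence proved
-- here is about the RETURN value only. B trades A's sort + streaming prefix-max for
-- plain quadratic domination scans (objective: alternative, not faster).

-- x[0] / x[1] of an inner list (exact within Pre_, where both indices are in range)
def pvW (x : List Int) : Int := PySem.List.pyGetD x 0 0
def pvP (x : List Int) : Int := PySem.List.pyGetD x 1 0

-- ===== PORT A =====
-- the for-loop of A: state (max_p, rank); early `return -1` = value -1
def solutionLoop (a0 a1 : Int) : List (List Int) → Int → Int → Int
  | [], _, rank => rank
  | x :: rest, max_p, rank =>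
    if a0 < pvW x ∧ a1 < pvP x then -1
    else if max_p ≤ pvP x then
      solutionLoop a0 a1 rest (pvP x) (if a0 + a1 < pvW x + pvP x then rank + 1 else rank)
    else
      solutionLoop a0 a1 rest max_p rank

def solution (scores : List (List Int)) : Int :=
  let answer := PySem.List.pyGetD scores 0 []
  let sorted := PySem.List.sorted2 scores (fun x => -(pvW x)) (fun x => pvP x)
  solutionLoop (pvW answer) (pvP answer) sorted 0 1

-- ===== PORT B =====
-- `dominated(x)` of Source B
def dominatedIn (scores : List (List Int)) (x : List Int) : Bool :=
  scores.any (fun y => decide (pvW x < pvW y ∧ pvP x < pvP y))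

def solution_alt (scores : List (List Int)) : Int :=
  let answer := PySem.List.pyGetD scores 0 []
  let base := pvW answer + pvP answer
  if dominatedIn scores answer then -1
  else 1 + (scores.countP (fun x => !dominatedIn scores x && decide (base < pvW x + pvP x)) : Int)

-- ===== PRECONDITION & SPEC =====
-- Pre_: exactly where Python A returns — a nonempty list of length-2 inner lists
-- (empty scores raises IndexError; an inner list of any other length raises
-- IndexError in the sort key or ValueError when the loop unpacks it).
def Pre_solution (scores : List (List Int)) : Prop :=
  scores ≠ [] ∧ ∀ x ∈ scores, x.length = 2
instance (scores : List (List Int)) : Decidable (Pre_solution scores) := by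
  unfold Pre_solution; infer_instance

def pvWitness_solution : List (List Int) := [[1, 2]]

-- On inputs whose first pair is undominated but which contain an undominated pair with
-- negative second score and pairwise sum exceeding the first pair's, A's prefix maximum
-- initialised to 0 skips such pairs and undercounts the rank, while B counts every
-- undominated pair with a larger sum — the intended rank.
def pvNotBeats (y x : List Int) : Prop := pvW y ≤ pvW x ∨ pvP y ≤ pvP x

def D_solution (scores : List (List Int)) : Prop :=
  let a := scores.headI
  ∃ x ∈ scores, pvP x < 0 ∧ pvW a + pvP a < pvW x + pvP x ∧
    ∀ y ∈ scores, pvNotBeats y x ∧ pvNotBeats y a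
instance (scores : List (List Int)) : Decidable (D_solution scores) := by
  unfold D_solution pvNotBeats; infer_instance

def Spec_solution (scores : List (List Int)) (out : Int) : Prop :=
  ¬ D_solution scores → out = solution_alt scores
instance (scores : List (List Int)) (out : Int) : Decidable (Spec_solution scores out) := by
  unfold Spec_solution; infer_instance

def pvDiffWitness_solution : List (List Int) := [[0, -1], [5, -2]]
def pvDiffWitnessOut_solution : Int × Int := (1, 2)

-- ===== CLAIM (what is proved, stated in full; the proofs are below) =====
def Claim_unchanged_solution : Prop := ∀ (scores : List (List Int)), Dom_solution scores → Pre_solution scores → Spec_solution scores (solution scores)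
def Claim_changed_solution : Prop := Dom_solution (pvDiffWitness_solution) ∧ Pre_solution (pvDiffWitness_solution) ∧ D_solution (pvDiffWitness_solution) ∧ solution (pvDiffWitness_solution) = pvDiffWitnessOut_solution.1 ∧ solution_alt (pvDiffWitness_solution) = pvDiffWitnessOut_solution.2 ∧ pvDiffWitnessOut_solution.1 ≠ pvDiffWitnessOut_solution.2
def Claim_exact_solution : Prop := ∀ (scores : List (List Int)), Dom_solution scores → Pre_solution scores → D_solution scores → solution scores ≠ solution_alt scores

-- ===== LEMMAS AND PROOFS =====

-- `(a0, a1)` is strictly dominated by some member of `l`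
def pvBeatC (l : List (List Int)) (a0 a1 : Int) : Bool :=
  l.any (fun y => decide (a0 < pvW y ∧ a1 < pvP y))

lemma pvBeatC_iff (l : List (List Int)) (a0 a1 : Int) :
    pvBeatC l a0 a1 ↔ ∃ y ∈ l, a0 < pvW y ∧ a1 < pvP y := by
  simp [pvBeatC]

-- sort order of A: w strictly decreasing, ties by p nondecreasing
def pvLe (a b : List Int) : Prop :=
  pvW b < pvW a ∨ (pvW b = pvW a ∧ pvP a ≤ pvP b)

lemma dominatedIn_eq (l : List (List Int)) (x : List Int) :
    dominatedIn l x = pvBeatC l (pvW x) (pvP x) := rfl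

lemma insertBy_pairwise_pvLe (x : List Int) (ys : List (List Int))
    (h : ys.Pairwise pvLe) :
    (PySem.List.insertBy
      (fun a b => decide (-(pvW a) < -(pvW b)) ||
        (!decide (-(pvW b) < -(pvW a)) && decide (pvP a < pvP b))) x ys).Pairwise pvLe := by
  induction ys with
  | nil => simp [PySem.List.insertBy.eq_1]
  | cons y ys ih =>
    rw [List.pairwise_cons] at h
    obtain ⟨hy, hys⟩ := h
    rw [PySem.List.insertBy.eq_2]
    by_cases hb : (decide (-(pvW x) < -(pvW y)) ||
        (!decide (-(pvW y) < -(pvW x)) && decide (pvP x < pvP y))) = true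
    · rw [if_pos hb]
      simp only [Bool.or_eq_true, Bool.and_eq_true, Bool.not_eq_true', decide_eq_true_eq,
        decide_eq_false_iff_not] at hb
      refine List.pairwise_cons.mpr ⟨?_, List.pairwise_cons.mpr ⟨hy, hys⟩⟩
      intro z hz
      rcases List.mem_cons.mp hz with rfl | hz
      · unfold pvLe; omega
      · have := hy z hz; unfold pvLe at this ⊢; omega
    · rw [if_neg hb]
      simp only [Bool.or_eq_true, Bool.and_eq_true, Bool.not_eq_true', decide_eq_true_eq,
        decide_eq_false_iff_not, not_or, not_and] at hb
      refine List.pairwise_cons.mpr ⟨?_, ih hys⟩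
      intro z hz
      rcases (PySem.List.mem_insertBy _ _ _ _).mp hz with rfl | hz
      · unfold pvLe; omega
      · exact hy z hz

lemma foldl_insertBy_pairwise_pvLe (l : List (List Int)) :
    ∀ (acc : List (List Int)), acc.Pairwise pvLe →
    (l.foldl (fun acc x => PySem.List.insertBy
      (fun a b => decide (-(pvW a) < -(pvW b)) ||
        (!decide (-(pvW b) < -(pvW a)) && decide (pvP a < pvP b))) x acc) acc).Pairwise pvLe := by
  induction l with
  | nil => intro acc hacc; exact hacc
  | cons z zs ih =>
    intro acc hacc
    simp only [List.foldl_cons]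
    exact ih _ (insertBy_pairwise_pvLe z acc hacc)

lemma sorted2_pairwise_pvLe (scores : List (List Int)) :
    (PySem.List.sorted2 scores (fun x => -(pvW x)) (fun x => pvP x)).Pairwise pvLe := by
  have heq : PySem.List.sorted2 scores (fun x => -(pvW x)) (fun x => pvP x) =
      scores.foldl (fun acc x => PySem.List.insertBy
        (fun a b => decide (-(pvW a) < -(pvW b)) ||
          (!decide (-(pvW b) < -(pvW a)) && decide (pvP a < pvP b))) x acc) [] := rfl
  rw [heq]
  exact foldl_insertBy_pairwise_pvLe scores [] List.Pairwise.nil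

lemma loopA_char (a0 a1 : Int) (l : List (List Int)) (hs : l.Pairwise pvLe) :
    ∀ (m r : Int), solutionLoop a0 a1 l m r =
      if pvBeatC l a0 a1 then -1
      else r + (l.countP (fun x =>
        decide (m ≤ pvP x ∧ ¬ pvBeatC l (pvW x) (pvP x) ∧ a0 + a1 < pvW x + pvP x)) : Int) := by
  induction l with
  | nil => intro m r; simp [solutionLoop, pvBeatC]
  | cons x t ih =>
    rw [List.pairwise_cons] at hs
    obtain ⟨hx, ht⟩ := hs
    intro m r
    have hdomiff : pvBeatC (x :: t) a0 a1 ↔ (a0 < pvW x ∧ a1 < pvP x) ∨ pvBeatC t a0 a1 := by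
      simp only [pvBeatC_iff]
      constructor
      · rintro ⟨y, hy, h⟩
        rcases List.mem_cons.mp hy with rfl | hy
        · exact Or.inl h
        · exact Or.inr ⟨y, hy, h⟩
      · rintro (h | ⟨y, hy, h⟩)
        · exact ⟨x, List.mem_cons_self, h⟩
        · exact ⟨y, List.mem_cons.mpr (Or.inr hy), h⟩
    have hsplit : ∀ z, pvBeatC (x :: t) (pvW z) (pvP z) ↔
        (pvW z < pvW x ∧ pvP z < pvP x) ∨ pvBeatC t (pvW z) (pvP z) := by
      intro z
      simp only [pvBeatC_iff]
      constructor
      · rintro ⟨y, hy, h⟩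
        rcases List.mem_cons.mp hy with rfl | hy
        · exact Or.inl h
        · exact Or.inr ⟨y, hy, h⟩
      · rintro (h | ⟨y, hy, h⟩)
        · exact ⟨x, List.mem_cons_self, h⟩
        · exact ⟨y, List.mem_cons.mpr (Or.inr hy), h⟩
    simp only [solutionLoop]
    by_cases hdomx : a0 < pvW x ∧ a1 < pvP x
    · rw [if_pos hdomx, if_pos (hdomiff.mpr (Or.inl hdomx))]
    · rw [if_neg hdomx]
      have hxnotdom : ¬ pvBeatC (x :: t) (pvW x) (pvP x) := by
        rw [pvBeatC_iff]
        rintro ⟨y, hy, h1, h2⟩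
        rcases List.mem_cons.mp hy with rfl | hy
        · omega
        · have := hx y hy; unfold pvLe at this; omega
      by_cases hm : m ≤ pvP x
      · rw [if_pos hm, ih ht]
        by_cases hdomt : pvBeatC t a0 a1
        · rw [if_pos hdomt, if_pos (hdomiff.mpr (Or.inr hdomt))]
        · have hnotdom : ¬ pvBeatC (x :: t) a0 a1 := by
            rw [hdomiff]; tauto
          rw [if_neg hdomt, if_neg hnotdom]
          have hcong : ∀ z ∈ t,
              (decide (pvP x ≤ pvP z ∧ ¬ pvBeatC t (pvW z) (pvP z) ∧
                a0 + a1 < pvW z + pvP z) = true) ↔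
              (decide (m ≤ pvP z ∧ ¬ pvBeatC (x :: t) (pvW z) (pvP z) ∧
                a0 + a1 < pvW z + pvP z) = true) := by
            intro z hz
            have hle := hx z hz
            unfold pvLe at hle
            simp only [decide_eq_true_eq, hsplit z]
            constructor
            · rintro ⟨h1, h2, h3⟩
              exact ⟨by omega, by rintro (⟨hw, hp⟩ | hd); omega; exact h2 hd, h3⟩
            · rintro ⟨h1, h2, h3⟩
              push Not at h2
              obtain ⟨h2a, h2b⟩ := h2
              exact ⟨by omega, h2b, h3⟩
          rw [List.countP_cons, List.countP_congr hcong]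
          have hxhead : (decide (m ≤ pvP x ∧ ¬ pvBeatC (x :: t) (pvW x) (pvP x) ∧
              a0 + a1 < pvW x + pvP x) = true) ↔ (a0 + a1 < pvW x + pvP x) := by
            simp only [decide_eq_true_eq]
            tauto
          by_cases hsum : a0 + a1 < pvW x + pvP x
          · rw [if_pos hsum, if_pos (hxhead.mpr hsum)]
            push_cast
            ring
          · rw [if_neg hsum, if_neg (by rw [hxhead]; exact hsum)]
            push_cast
            ring
      · rw [if_neg hm, ih ht]
        by_cases hdomt : pvBeatC t a0 a1
        · rw [if_pos hdomt, if_pos (hdomiff.mpr (Or.inr hdomt))]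
        · have hnotdom : ¬ pvBeatC (x :: t) a0 a1 := by
            rw [hdomiff]; tauto
          rw [if_neg hdomt, if_neg hnotdom]
          have hcong : ∀ z ∈ t,
              (decide (m ≤ pvP z ∧ ¬ pvBeatC t (pvW z) (pvP z) ∧
                a0 + a1 < pvW z + pvP z) = true) ↔
              (decide (m ≤ pvP z ∧ ¬ pvBeatC (x :: t) (pvW z) (pvP z) ∧
                a0 + a1 < pvW z + pvP z) = true) := by
            intro z hz
            simp only [decide_eq_true_eq, hsplit z]
            constructor
            · rintro ⟨h1, h2, h3⟩
              exact ⟨h1, by rintro (⟨hw, hp⟩ | hd); omega; exact h2 hd, h3⟩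
            · rintro ⟨h1, h2, h3⟩
              push Not at h2
              exact ⟨h1, h2.2, h3⟩
          rw [List.countP_cons, List.countP_congr hcong]
          have hxhead : ¬ (decide (m ≤ pvP x ∧ ¬ pvBeatC (x :: t) (pvW x) (pvP x) ∧
              a0 + a1 < pvW x + pvP x) = true) := by
            simp only [decide_eq_true_eq]
            tauto
          rw [if_neg hxhead]
          push_cast
          ring

lemma countP_lt_of {α : Type} (l : List α) (p q : α → Bool)
    (hpq : ∀ a ∈ l, p a = true → q a = true)
    (x : α) (hx : x ∈ l) (hq : q x = true) (hp : p x = false) :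
    l.countP p < l.countP q := by
  induction l with
  | nil => cases hx
  | cons a l ih =>
    rw [List.countP_cons, List.countP_cons]
    rcases List.mem_cons.mp hx with rfl | hx
    · have hle : l.countP p ≤ l.countP q :=
        List.countP_mono_left (fun z hz => hpq z (List.mem_cons.mpr (Or.inr hz)))
      rw [hp, hq]
      norm_num
      omega
    · have hlt := ih (fun z hz => hpq z (List.mem_cons.mpr (Or.inr hz))) hx
      have hhead : (if p a then 1 else 0) ≤ (if q a then 1 else 0) := by
        by_cases hpa : p a = true
        · rw [if_pos hpa, if_pos (hpq a List.mem_cons_self hpa)]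
        · rw [if_neg hpa]; split <;> omega
      omega

-- A's value, characterised over the ORIGINAL list
lemma solution_char (a : List Int) (t : List (List Int)) :
    solution (a :: t) =
      if pvBeatC (a :: t) (pvW a) (pvP a) then -1
      else 1 + ((a :: t).countP (fun x =>
        decide (0 ≤ pvP x ∧ ¬ pvBeatC (a :: t) (pvW x) (pvP x) ∧
          pvW a + pvP a < pvW x + pvP x)) : Int) := by
  show solutionLoop _ _ _ 0 1 = _
  have hget : PySem.List.pyGetD (a :: t) 0 ([] : List Int) = a := by
    simp [PySem.List.pyGetD, PySem.List.pyGet?, PySem.List.pyIdx?]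
  rw [hget]
  have hperm : (PySem.List.sorted2 (a :: t) (fun x => -(pvW x)) (fun x => pvP x)).Perm (a :: t) :=
    PySem.List.sorted2_perm (a :: t) _ _ false
  have hdomiff : ∀ (b0 b1 : Int),
      pvBeatC (PySem.List.sorted2 (a :: t) (fun x => -(pvW x)) (fun x => pvP x)) b0 b1 ↔
      pvBeatC (a :: t) b0 b1 := by
    intro b0 b1
    simp only [pvBeatC_iff]
    constructor
    · rintro ⟨y, hy, h⟩; exact ⟨y, hperm.mem_iff.mp hy, h⟩
    · rintro ⟨y, hy, h⟩; exact ⟨y, hperm.mem_iff.mpr hy, h⟩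
  rw [loopA_char (pvW a) (pvP a) _ (sorted2_pairwise_pvLe (a :: t)) 0 1]
  by_cases hd : pvBeatC (a :: t) (pvW a) (pvP a)
  · rw [if_pos ((hdomiff _ _).mpr hd), if_pos hd]
  · rw [if_neg (fun h => hd ((hdomiff _ _).mp h)), if_neg hd]
    have hcong : ∀ z ∈ PySem.List.sorted2 (a :: t) (fun x => -(pvW x)) (fun x => pvP x),
        (decide (0 ≤ pvP z ∧
          ¬ pvBeatC (PySem.List.sorted2 (a :: t) (fun x => -(pvW x)) (fun x => pvP x))
            (pvW z) (pvP z) ∧ pvW a + pvP a < pvW z + pvP z) = true) ↔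
        (decide (0 ≤ pvP z ∧ ¬ pvBeatC (a :: t) (pvW z) (pvP z) ∧
          pvW a + pvP a < pvW z + pvP z) = true) := by
      intro z _
      simp only [decide_eq_true_eq, hdomiff]
    rw [List.countP_congr hcong, hperm.countP_eq]

-- B's value in the same shape
lemma solution_alt_char (a : List Int) (t : List (List Int)) :
    solution_alt (a :: t) =
      if pvBeatC (a :: t) (pvW a) (pvP a) then -1
      else 1 + ((a :: t).countP (fun x =>
        decide (¬ pvBeatC (a :: t) (pvW x) (pvP x) ∧
          pvW a + pvP a < pvW x + pvP x)) : Int) := by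
  show (if dominatedIn (a :: t) (PySem.List.pyGetD (a :: t) 0 []) then (-1 : Int) else _) = _
  have hget : PySem.List.pyGetD (a :: t) 0 ([] : List Int) = a := by
    simp [PySem.List.pyGetD, PySem.List.pyGet?, PySem.List.pyIdx?]
  rw [hget]
  by_cases hd : pvBeatC (a :: t) (pvW a) (pvP a)
  · rw [if_pos (by rw [dominatedIn_eq]; exact hd), if_pos hd]
  · have hfalse : dominatedIn (a :: t) a = false := by
      rw [dominatedIn_eq, Bool.eq_false_iff]
      exact hd
    rw [hfalse]
    simp only [Bool.false_eq_true, if_false, if_neg hd]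
    have hcong : ∀ z ∈ (a :: t),
        ((!dominatedIn (a :: t) z && decide (pvW a + pvP a < pvW z + pvP z)) = true) ↔
        (decide (¬ pvBeatC (a :: t) (pvW z) (pvP z) ∧
          pvW a + pvP a < pvW z + pvP z) = true) := by
      intro z _
      simp only [dominatedIn_eq, Bool.and_eq_true, Bool.not_eq_true', Bool.eq_false_iff, Ne,
        decide_eq_true_eq]
    rw [List.countP_congr hcong]

-- ===== VERDICT (by name: the statement is the Claim_ definition above) =====
theorem solution_spec : Claim_unchanged_solution := by
  intro scores hdom hpre hnd
  obtain ⟨hne, hlen⟩ := hpre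
  cases scores with
  | nil => exact absurd rfl hne
  | cons a t =>
    rw [solution_char, solution_alt_char]
    by_cases hd : pvBeatC (a :: t) (pvW a) (pvP a)
    · rw [if_pos hd, if_pos hd]
    · rw [if_neg hd, if_neg hd]
      have hcong : ∀ z ∈ (a :: t),
          (decide (0 ≤ pvP z ∧ ¬ pvBeatC (a :: t) (pvW z) (pvP z) ∧
            pvW a + pvP a < pvW z + pvP z) = true) ↔
          (decide (¬ pvBeatC (a :: t) (pvW z) (pvP z) ∧
            pvW a + pvP a < pvW z + pvP z) = true) := by
        intro z hz
        simp only [decide_eq_true_eq]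
        constructor
        · rintro ⟨_, h2, h3⟩
          exact ⟨h2, h3⟩
        · rintro ⟨hzd, h3⟩
          refine ⟨?_, hzd, h3⟩
          by_contra hneg
          apply hnd
          unfold D_solution
          simp only [List.headI_cons]
          refine ⟨z, hz, by omega, h3, ?_⟩
          intro y hy
          have hyz : ¬(pvW z < pvW y ∧ pvP z < pvP y) := fun h =>
            hzd ((pvBeatC_iff _ _ _).mpr ⟨y, hy, h⟩)
          have hya : ¬(pvW a < pvW y ∧ pvP a < pvP y) := fun h =>
            hd ((pvBeatC_iff _ _ _).mpr ⟨y, hy, h⟩)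
          unfold pvNotBeats
          omega
      rw [List.countP_congr hcong]

theorem solution_changed : Claim_changed_solution := by
  unfold Claim_changed_solution; decide

theorem solution_tight : Claim_exact_solution := by
  intro scores hdom hpre hD
  obtain ⟨hne, hlen⟩ := hpre
  cases scores with
  | nil => exact absurd rfl hne
  | cons a t =>
    obtain ⟨x, hx, hneg, hsum, hall⟩ := hD
    simp only [List.headI_cons] at hsum hall
    have hd : ¬ pvBeatC (a :: t) (pvW a) (pvP a) := by
      rw [pvBeatC_iff]
      rintro ⟨y, hy, h⟩
      have := (hall y hy).2
      unfold pvNotBeats at this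
      omega
    have hxd : ¬ pvBeatC (a :: t) (pvW x) (pvP x) := by
      rw [pvBeatC_iff]
      rintro ⟨y, hy, h⟩
      have := (hall y hy).1
      unfold pvNotBeats at this
      omega
    rw [solution_char, solution_alt_char, if_neg hd, if_neg hd]
    have hlt : (a :: t).countP (fun z => decide (0 ≤ pvP z ∧
          ¬ pvBeatC (a :: t) (pvW z) (pvP z) ∧ pvW a + pvP a < pvW z + pvP z)) <
        (a :: t).countP (fun z => decide (¬ pvBeatC (a :: t) (pvW z) (pvP z) ∧
          pvW a + pvP a < pvW z + pvP z)) := by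
      refine countP_lt_of _ _ _ ?_ x hx ?_ ?_
      · intro z hz
        simp only [decide_eq_true_eq]
        rintro ⟨_, h2, h3⟩
        exact ⟨h2, h3⟩
      · simp only [decide_eq_true_eq]
        exact ⟨hxd, hsum⟩
      · simp only [decide_eq_false_iff_not]
        rintro ⟨h0, _, _⟩
        omega
    intro heq
    omega
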